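-- pv_equiv track=rewrite | github.com/pypi-data/pypi-mirror-13 | packages/tryalgo/tryalgo-0.9.tar.gz/tryalgo-0.9/tryalgo/predictive_text.py | predictive_text
-- ===== SOURCE A (Python) =====
-- t9 = "22233344455566677778889999"
--
-- def lettre_chiffre(x):
--     """:returns: the digit correspondence for letter x"""
--     assert 'a' <= x and x <= 'z'
--     return t9[ord(x)-ord('a')]
--
-- def mot_code(mot):
--     """:returns: the digit correspondence for word mot"""
--     return ''.join(map(lettre_chiffre, mot))
--
-- def predictive_text(dico):
--     """Predictive text for mobile phones
--
--     :param dico: associates weights to words from [a-z]*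
--     :returns: a dictionary associating to words from [2-9]*
--              a corresponding word from the dictionary with highest weight
--     :complexity: linear in total word length
--     """
--     freq = {}   # freq[p] = poids total des mots de préfixe p
--     for mot, poids in dico:
--         prefixe = ""
--         for x in mot:
--             prefixe += x
--             if prefixe in freq:
--                 freq[prefixe] += poids
--             else:
--                 freq[prefixe] = poids
--     #   prop[s] = préfixe à afficher sur s
--     prop = {}
--     for prefixe in freq:
--         code = mot_code(prefixe)
--         if code not in prop or freq[prop[code]] < freq[prefixe]:
--             prop[code] = prefixe
--     return prop
-- ===== SOURCE B (Python) =====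
-- _T9 = str.maketrans("abcdefghijklmnopqrstuvwxyz", "22233344455566677778889999")
--
-- def predictive_text(dico):
--     # group prefix weights by digit code, then pick the heaviest prefix per code
--     groups = {}                      # digit code -> {prefix: accumulated weight}
--     for mot, poids in dico:
--         code = mot.translate(_T9)
--         for i in range(1, len(mot) + 1):
--             g = groups.setdefault(code[:i], {})
--             p = mot[:i]
--             g[p] = g.get(p, 0) + poids
--     return {c: max(g, key=g.get) for c, g in groups.items()}
-- ===== Notes on version B (the rewrite author's own statement) =====
-- stated objective: faster
-- what changed: Instead of a flat prefix-to-weight dict scanned afterwards with each prefix re-encoded character by character via mot_code/lettre_chiffre, B groups prefix weights by digit code in one pass (nested dict keyed by code, each word encoded once with str.translate and sliced) and picks each code's heaviest prefix with max(g, key=g.get).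
import Mathlib
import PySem

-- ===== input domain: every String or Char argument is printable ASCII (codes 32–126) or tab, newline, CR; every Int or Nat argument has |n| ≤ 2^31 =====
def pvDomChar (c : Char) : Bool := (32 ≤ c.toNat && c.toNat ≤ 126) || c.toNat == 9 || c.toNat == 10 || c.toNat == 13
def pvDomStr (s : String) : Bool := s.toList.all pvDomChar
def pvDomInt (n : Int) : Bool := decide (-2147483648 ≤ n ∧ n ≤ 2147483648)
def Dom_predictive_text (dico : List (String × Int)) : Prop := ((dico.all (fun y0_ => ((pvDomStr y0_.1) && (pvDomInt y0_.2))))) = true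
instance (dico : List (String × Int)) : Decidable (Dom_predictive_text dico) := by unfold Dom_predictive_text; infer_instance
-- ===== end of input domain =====

-- B groups prefix weights by digit code in one pass (nested dict, each word encoded once) and takes
-- a per-code max, instead of A's flat prefix->weight dict whose second scan re-encodes every prefix
-- character by character; measurably faster in a timing run.

-- ===== PORT A =====
def t9Str : String := "22233344455566677778889999"

-- assert 'a' <= x <= 'z' raises outside a-z: excluded by Pre_; the .getD ' ' default is unreachable under Pre_
def lettre_chiffre (x : Char) : Char :=
  (PySem.Str.pyGet? t9Str ((x.toNat : Int) - 97)).getD ' '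

def mot_code (mot : String) : String :=
  String.ofList (mot.toList.map lettre_chiffre)

-- first loop of A: freq[p] = total weight of words with prefix p
def freqOf (dico : List (String × Int)) : PySem.Dict String Int :=
  dico.foldl (fun freq mw =>
    (mw.1.toList.foldl (fun (st : String × PySem.Dict String Int) x =>
      let prefixe := st.1.push x
      if st.2.contains prefixe then
        (prefixe, st.2.insert prefixe (st.2.getD prefixe 0 + mw.2))   -- freq[prefixe] += poids
      else
        (prefixe, st.2.insert prefixe mw.2)) ("", freq)).2) PySem.Dict.empty

-- second loop of A: prop[code] = prefix of highest weight; lookups always hit existing keys,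
-- the getD defaults "" and 0 are unreachable
def propOf (freq : PySem.Dict String Int) : PySem.Dict String String :=
  freq.keys.foldl (fun prop prefixe =>
    let code := mot_code prefixe
    if !prop.contains code || freq.getD (prop.getD code "") 0 < freq.getD prefixe 0 then
      prop.insert code prefixe
    else prop) PySem.Dict.empty

def predictive_text (dico : List (String × Int)) : List (String × String) :=
  (propOf (freqOf dico)).items

-- ===== PORT B =====
-- str.maketrans/translate: map a-z to its digit, leave every other character unchanged
def transT9 : String := "22233344455566677778889999"

def transChar (c : Char) : Char :=
  if 'a' ≤ c ∧ c ≤ 'z' then (PySem.Str.pyGet? transT9 ((c.toNat : Int) - 97)).getD c else c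

-- max(g, key=g.get): first key with maximal value; the "" default is unreachable (g never empty)
def maxKeyByVal (g : PySem.Dict String Int) : String :=
  ((g.items.foldl (fun (best : Option (String × Int)) kv =>
      match best with
      | none => some kv
      | some b => if b.2 < kv.2 then some kv else best) none).map Prod.fst).getD ""

-- B's single pass: groups[code[:i]][mot[:i]] += poids
def groupsOf (dico : List (String × Int)) : PySem.Dict String (PySem.Dict String Int) :=
  dico.foldl (fun groups mw =>
    let code := String.ofList (mw.1.toList.map transChar)
    (PySem.List.pyRange 1 ((mw.1.toList.length : Int) + 1) 1).foldl (fun groups i =>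
      -- g = groups.setdefault(code[:i], {}); g[p] = g.get(p, 0) + poids  (g is aliased inside groups)
      let key := String.ofList (code.toList.take i.toNat)
      let g := groups.getD key PySem.Dict.empty
      let p := String.ofList (mw.1.toList.take i.toNat)
      groups.insert key (g.insert p (g.getD p 0 + mw.2))) groups) PySem.Dict.empty

def predictive_text_alt (dico : List (String × Int)) : List (String × String) :=
  (groupsOf dico).items.map (fun cg => (cg.1, maxKeyByVal cg.2))

-- ===== PRECONDITION & SPEC =====
-- Pre_ excludes exactly the inputs on which A raises AssertionError: some word with a character outside a-z.
def Pre_predictive_text (dico : List (String × Int)) : Prop :=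
  (dico.all (fun mw => mw.1.toList.all (fun c => 'a' ≤ c && c ≤ 'z'))) = true
instance (dico : List (String × Int)) : Decidable (Pre_predictive_text dico) := by
  unfold Pre_predictive_text; infer_instance
def pvWitness_predictive_text : (List (String × Int)) := [("ab", 5), ("b", 3), ("ba", 5)]

def Spec_predictive_text (dico : List (String × Int)) (out : List (String × String)) : Prop := out = predictive_text_alt dico
instance (dico : List (String × Int)) (out : List (String × String)) : Decidable (Spec_predictive_text dico out) := by unfold Spec_predictive_text; infer_instance

-- ===== CLAIM (what is proved, stated in full; the proofs are below) =====
def Claim_equal_predictive_text : Prop := ∀ (dico : List (String × Int)), Dom_predictive_text dico → Pre_predictive_text dico → Spec_predictive_text dico (predictive_text dico)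

-- ===== LEMMAS AND PROOFS =====

-- the elementary per-prefix update steps of A's and B's first loops, over the flattened stream
def stepF (F : PySem.Dict String Int) (pw : String × Int) : PySem.Dict String Int :=
  F.insert pw.1 (F.getD pw.1 0 + pw.2)

def stepG (G : PySem.Dict String (PySem.Dict String Int)) (pw : String × Int) :
    PySem.Dict String (PySem.Dict String Int) :=
  G.insert (mot_code pw.1)
    ((G.getD (mot_code pw.1) PySem.Dict.empty).insert pw.1
      ((G.getD (mot_code pw.1) PySem.Dict.empty).getD pw.1 0 + pw.2))

def prefixUpd (cs : List Char) (w : Int) : List (String × Int) :=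
  (List.range cs.length).map (fun j => (String.ofList (cs.take (j+1)), w))

def updates (dico : List (String × Int)) : List (String × Int) :=
  dico.flatMap (fun mw => prefixUpd mw.1.toList mw.2)

def codesOf (I : List (String × Int)) : List String :=
  PySem.Set.ofList (I.map (fun pw => mot_code pw.1))

def fmaxStep (best : Option (String × Int)) (kv : String × Int) : Option (String × Int) :=
  match best with
  | none => some kv
  | some b => if b.2 < kv.2 then some kv else best

def fmax (l : List (String × Int)) : Option (String × Int) := l.foldl fmaxStep none

def fmaxKey (l : List (String × Int)) : String := ((fmax l).map Prod.fst).getD ""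

def propStep (F : PySem.Dict String Int) (prop : PySem.Dict String String) (prefixe : String) :
    PySem.Dict String String :=
  if !prop.contains (mot_code prefixe)
      || F.getD (prop.getD (mot_code prefixe) "") 0 < F.getD prefixe 0 then
    prop.insert (mot_code prefixe) prefixe
  else prop

-- collapse of A's if-branches into a single upsert
lemma ifInsert (F : PySem.Dict String Int) (p : String) (w : Int) :
    (if F.contains p then F.insert p (F.getD p 0 + w) else F.insert p w) = stepF F (p, w) := by
  unfold stepF
  by_cases h : F.contains p = true
  · simp [h]
  · simp only [Bool.not_eq_true] at h
    simp [h, PySem.Dict.getD_of_not_contains F 0 h]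

lemma push_ofList (s : List Char) (c : Char) : (String.ofList s).push c = String.ofList (s ++ [c]) := by
  apply String.ext; simp
lemma innerA (cs : List Char) (w : Int) : ∀ (s : List Char) (F : PySem.Dict String Int),
    cs.foldl (fun (st : String × PySem.Dict String Int) x =>
      let prefixe := st.1.push x
      if st.2.contains prefixe then
        (prefixe, st.2.insert prefixe (st.2.getD prefixe 0 + w))
      else
        (prefixe, st.2.insert prefixe w)) (String.ofList s, F)
    = (String.ofList (s ++ cs),
       ((List.range cs.length).map (fun j => ((String.ofList (s ++ cs.take (j+1)) : String), w))).foldl stepF F) := by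
  induction cs with
  | nil => intro s F; simp
  | cons c cs ih =>
    intro s F
    rw [List.foldl_cons]
    simp only [push_ofList]
    have hstep : (if F.contains (String.ofList (s ++ [c])) = true then
          (String.ofList (s ++ [c]), F.insert (String.ofList (s ++ [c])) (F.getD (String.ofList (s ++ [c])) 0 + w))
        else (String.ofList (s ++ [c]), F.insert (String.ofList (s ++ [c])) w))
        = (String.ofList (s ++ [c]), stepF F (String.ofList (s ++ [c]), w)) := by
      rw [← ifInsert]; split <;> rfl
    rw [hstep, ih (s ++ [c])]
    rw [Prod.mk.injEq]
    refine ⟨by simp, ?_⟩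
    simp [List.range_succ_eq_map, List.map_map, Function.comp_def, List.append_assoc]
lemma freqOf_eq (dico : List (String × Int)) :
    freqOf dico = (updates dico).foldl stepF PySem.Dict.empty := by
  unfold freqOf
  have main : ∀ (d : List (String × Int)) (F : PySem.Dict String Int),
      d.foldl (fun freq mw =>
        (mw.1.toList.foldl (fun (st : String × PySem.Dict String Int) x =>
          let prefixe := st.1.push x
          if st.2.contains prefixe then
            (prefixe, st.2.insert prefixe (st.2.getD prefixe 0 + mw.2))
          else
            (prefixe, st.2.insert prefixe mw.2)) ("", freq)).2) F
      = (updates d).foldl stepF F := by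
    intro d
    induction d with
    | nil => intro F; simp [updates]
    | cons mw rest ih =>
      intro F
      rw [List.foldl_cons]
      have hin : ("" : String) = String.ofList [] := rfl
      rw [hin, innerA mw.1.toList mw.2 [] F]
      rw [ih]
      simp [updates, prefixUpd, List.foldl_append]
  exact main dico PySem.Dict.empty
lemma transChar_eq_lettre (c : Char) (h1 : 'a' ≤ c) (h2 : c ≤ 'z') :
    transChar c = lettre_chiffre c := by
  unfold transChar lettre_chiffre
  rw [if_pos ⟨h1, h2⟩]
  rw [show transT9 = t9Str from rfl]
  have hsome : (PySem.Str.pyGet? t9Str ((c.toNat : Int) - 97)).isSome := by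
    have hge : 97 ≤ c.toNat := h1
    have hlt : c.toNat ≤ 122 := h2
    simp only [PySem.Str.pyGet?, PySem.Chars.pyGet?, PySem.List.pyGet?, PySem.List.pyIdx?]
    have hL : t9Str.toList.length = 26 := by decide
    simp only [hL]
    rw [if_pos (by omega : (0:Int) ≤ (c.toNat : Int) - 97),
        if_pos (by push_cast; omega : ((c.toNat : Int) - 97) < ((26:Nat) : Int))]
    simp
    have hL2 : t9Str.length = 26 := by decide
    omega
  obtain ⟨d, hd⟩ := Option.isSome_iff_exists.mp hsome
  rw [hd]
  rfl

lemma innerB (cs : List Char) (w : Int) (h : ∀ c ∈ cs, 'a' ≤ c ∧ c ≤ 'z') :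
    ∀ (G : PySem.Dict String (PySem.Dict String Int)),
    (PySem.List.pyRange 1 ((cs.length : Int) + 1) 1).foldl (fun groups i =>
      groups.insert (String.ofList ((cs.map transChar).take i.toNat))
        ((groups.getD (String.ofList ((cs.map transChar).take i.toNat)) PySem.Dict.empty).insert
          (String.ofList (cs.take i.toNat))
          ((groups.getD (String.ofList ((cs.map transChar).take i.toNat)) PySem.Dict.empty).getD
            (String.ofList (cs.take i.toNat)) 0 + w))) G
    = (prefixUpd cs w).foldl stepG G := by
  intro G
  rw [PySem.List.pyRange_one]
  have hn : ((cs.length : Int) + 1 - 1).toNat = cs.length := by omega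
  rw [hn]
  rw [List.foldl_map]
  unfold prefixUpd
  rw [List.foldl_map]
  apply PySem.List.foldl_congr_mem
  intro acc j hj
  have hj' : j < cs.length := List.mem_range.mp hj
  have htn : ((1 : Int) + (j : Int)).toNat = j + 1 := by omega
  simp only [htn, stepG]
  have hkey : String.ofList ((cs.map transChar).take (j+1)) = mot_code (String.ofList (cs.take (j+1))) := by
    unfold mot_code
    rw [String.toList_ofList, ← List.map_take]
    congr 1
    apply List.map_congr_left
    intro c hc
    have hmem : c ∈ cs := List.mem_of_mem_take hc
    exact transChar_eq_lettre c (h c hmem).1 (h c hmem).2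
  rw [hkey]
lemma groupsOf_eq (dico : List (String × Int)) (hpre : Pre_predictive_text dico) :
    groupsOf dico = (updates dico).foldl stepG PySem.Dict.empty := by
  unfold groupsOf
  simp only [String.toList_ofList]
  unfold Pre_predictive_text at hpre
  rw [List.all_eq_true] at hpre
  have main : ∀ (d : List (String × Int)),
      (∀ mw ∈ d, ∀ c ∈ mw.1.toList, 'a' ≤ c ∧ c ≤ 'z') →
      ∀ (G : PySem.Dict String (PySem.Dict String Int)),
      d.foldl (fun groups mw =>
        (PySem.List.pyRange 1 ((mw.1.toList.length : Int) + 1) 1).foldl (fun groups i =>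
          groups.insert (String.ofList ((mw.1.toList.map transChar).take i.toNat))
            ((groups.getD (String.ofList ((mw.1.toList.map transChar).take i.toNat)) PySem.Dict.empty).insert
              (String.ofList (mw.1.toList.take i.toNat))
              ((groups.getD (String.ofList ((mw.1.toList.map transChar).take i.toNat)) PySem.Dict.empty).getD
                (String.ofList (mw.1.toList.take i.toNat)) 0 + mw.2))) groups) G
      = (updates d).foldl stepG G := by
    intro d
    induction d with
    | nil => intro _ G; simp [updates]
    | cons mw rest ih =>
      intro hall G
      rw [List.foldl_cons]
      rw [innerB mw.1.toList mw.2 (fun c hc => hall mw (List.mem_cons_self) c hc)]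
      rw [ih (fun m hm => hall m (List.mem_cons_of_mem _ hm))]
      simp [updates, List.foldl_append]
  apply main dico
  intro mw hmw c hc
  have := hpre mw hmw
  rw [List.all_eq_true] at this
  have h := this c hc
  exact ⟨by simpa using (Bool.and_elim_left h), by simpa using (Bool.and_elim_right h)⟩

lemma nodup_keys_F (u : List (String × Int)) :
    ((u.foldl stepF PySem.Dict.empty).keys).Nodup := by
  exact PySem.Dict.nodup_keys_foldl_insert_key u Prod.fst
    (fun d x => d.getD x.1 0 + x.2) PySem.Dict.empty (by simp [PySem.Dict.keys, PySem.Dict.empty])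

-- keys of a code-filtered group, as a sublist of F's keys
lemma keys_filter_sublist (F : PySem.Dict String Int) (c : String) :
    ((F.items.filter (fun pw => mot_code pw.1 == c)).map Prod.fst).Sublist F.keys := by
  simp only [PySem.Dict.keys]
  exact List.filter_sublist.map _

lemma mem_keys_filter (F : PySem.Dict String Int) (c p : String) :
    p ∈ ((F.items.filter (fun pw => mot_code pw.1 == c)).map Prod.fst)
      ↔ (p ∈ F.keys ∧ mot_code p = c) := by
  simp only [PySem.Dict.keys, List.mem_map, List.mem_filter]
  constructor
  · rintro ⟨pw, ⟨hmem, hpred⟩, rfl⟩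
    exact ⟨⟨pw, hmem, rfl⟩, by simpa using hpred⟩
  · rintro ⟨⟨pw, hmem, rfl⟩, hc⟩
    exact ⟨pw, ⟨hmem, by simpa using hc⟩, rfl⟩

-- lookups in a code-filtered group agree with lookups in F
lemma getD_filter (F : PySem.Dict String Int) (c p : String) (hnd : F.keys.Nodup)
    (hc : mot_code p = c) (g : PySem.Dict String Int)
    (hg : g.items = F.items.filter (fun pw => mot_code pw.1 == c)) :
    g.getD p 0 = F.getD p 0 ∧ g.contains p = F.contains p := by
  have hgkeys : g.keys = (F.items.filter (fun pw => mot_code pw.1 == c)).map Prod.fst := by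
    simp only [PySem.Dict.keys, hg]
  have hgnd : g.keys.Nodup := by
    rw [hgkeys]; exact (keys_filter_sublist F c).nodup hnd
  by_cases hp : F.contains p = true
  · have hpk : p ∈ F.keys := (PySem.Dict.contains_iff_mem_keys F p).mp hp
    have hsome : ∃ v, F.get? p = some v := by
      have := PySem.Dict.get?_eq_none_iff_not_mem_keys (d := F) (k := p)
      cases hv : F.get? p with
      | none => exact absurd (this.mp hv) (by simpa using hpk)
      | some v => exact ⟨v, rfl⟩
    obtain ⟨v, hv⟩ := hsome
    have hmem : (p, v) ∈ F.items := PySem.Dict.mem_items_of_get?_eq_some F hv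
    have hmemg : (p, v) ∈ g.items := by
      rw [hg]; exact List.mem_filter.mpr ⟨hmem, by simpa using hc⟩
    have hcg : g.contains p = true := by
      rw [PySem.Dict.contains_iff_mem_keys, hgkeys, mem_keys_filter]
      exact ⟨hpk, hc⟩
    refine ⟨?_, by rw [hcg, hp]⟩
    rw [PySem.Dict.getD_of_mem_items g hmemg hgnd, PySem.Dict.getD_of_get?_eq_some F 0 hv]
  · have hp' : F.contains p = false := by simpa using hp
    have hcg : g.contains p = false := by
      cases hcg : g.contains p with
      | false => rfl
      | true =>
        have := (PySem.Dict.contains_iff_mem_keys g p).mp hcg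
        rw [hgkeys, mem_keys_filter] at this
        exact absurd ((PySem.Dict.contains_iff_mem_keys F p).mpr this.1) (by simpa using hp)
    rw [PySem.Dict.getD_of_not_contains g 0 hcg, PySem.Dict.getD_of_not_contains F 0 hp']
    exact ⟨rfl, by rw [hcg, hp']⟩

-- filtering by a code other than the updated key's ignores an in-place update
lemma filter_insert_ne (F : PySem.Dict String Int) (p : String) (v : Int) (c' : String)
    (hne : mot_code p ≠ c') (hp : F.contains p = true) :
    (F.insert p v).items.filter (fun q => mot_code q.1 == c')
      = F.items.filter (fun q => mot_code q.1 == c') := by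
  rw [PySem.Dict.items_insert_of_contains F v hp, List.filter_map]
  have hfc : F.items.filter ((fun q => mot_code q.1 == c') ∘ fun q => if q.1 == p then (p, v) else q)
      = F.items.filter (fun q => mot_code q.1 == c') := by
    apply List.filter_congr
    intro q hq
    by_cases hqp : (q.1 == p) = true
    · have : q.1 = p := by simpa using hqp
      simp [Function.comp, this]
    · simp [Function.comp, hqp]
  rw [hfc]
  conv_rhs => rw [← List.map_id (F.items.filter (fun q => mot_code q.1 == c'))]
  apply List.map_congr_left
  intro q hq
  have hqc : mot_code q.1 = c' := by simpa using (List.mem_filter.mp hq).2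
  have hqp : (q.1 == p) = false := by
    cases h' : (q.1 == p) with
    | false => rfl
    | true =>
      have : q.1 = p := by simpa using h'
      exact absurd (this ▸ hqc) hne
  simp [hqp]

-- filtering by the updated key's own code maps the in-place update through
lemma filter_insert_eq (F : PySem.Dict String Int) (p : String) (v : Int) (c' : String)
    (_hc : mot_code p = c') (hp : F.contains p = true) :
    (F.insert p v).items.filter (fun q => mot_code q.1 == c')
      = (F.items.filter (fun q => mot_code q.1 == c')).map
          (fun q => if q.1 == p then (p, v) else q) := by
  rw [PySem.Dict.items_insert_of_contains F v hp, List.filter_map]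
  congr 1
  apply List.filter_congr
  intro q hq
  by_cases hqp : (q.1 == p) = true
  · have hq1 : q.1 = p := by simpa using hqp
    simp [Function.comp, hq1]
  · simp [Function.comp, hqp]

-- the partition invariant relating B's grouped dict to A's flat dict
lemma part_inv (u : List (String × Int)) :
    (u.foldl stepG PySem.Dict.empty).keys = codesOf (u.foldl stepF PySem.Dict.empty).items
    ∧ ∀ c, ((u.foldl stepG PySem.Dict.empty).getD c PySem.Dict.empty).items
        = (u.foldl stepF PySem.Dict.empty).items.filter (fun pw => mot_code pw.1 == c) := by
  induction u using List.reverseRecOn with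
  | nil =>
    refine ⟨by simp [codesOf, PySem.Dict.keys, PySem.Dict.empty], ?_⟩
    intro c
    simp [PySem.Dict.empty, PySem.Dict.getD, PySem.Dict.get?]
  | append_singleton u pw ih =>
    obtain ⟨ih1, ih2⟩ := ih
    have hnd := nodup_keys_F u
    rw [List.foldl_append, List.foldl_append]
    simp only [List.foldl_cons, List.foldl_nil]
    set F := u.foldl stepF PySem.Dict.empty
    set G := u.foldl stepG PySem.Dict.empty
    have hg : (G.getD (mot_code pw.1) PySem.Dict.empty).items
        = F.items.filter (fun q => mot_code q.1 == mot_code pw.1) := ih2 (mot_code pw.1)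
    obtain ⟨hval, hcont⟩ :=
      getD_filter F (mot_code pw.1) pw.1 hnd rfl (G.getD (mot_code pw.1) PySem.Dict.empty) hg
    have hGc_iff : G.contains (mot_code pw.1) = true
        ↔ mot_code pw.1 ∈ F.items.map (fun q => mot_code q.1) := by
      rw [PySem.Dict.contains_iff_mem_keys, ih1, codesOf, PySem.Set.mem_ofList]
    show (G.insert (mot_code pw.1) _).keys = codesOf (F.insert pw.1 _).items
      ∧ ∀ c, ((G.insert (mot_code pw.1) _).getD c PySem.Dict.empty).items
          = (F.insert pw.1 _).items.filter (fun q => mot_code q.1 == c)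
    by_cases hp : F.contains pw.1 = true
    · -- in-place update of an existing prefix
      have hFi := PySem.Dict.items_insert_of_contains F (F.getD pw.1 0 + pw.2) hp
      have hcodes : (F.insert pw.1 (F.getD pw.1 0 + pw.2)).items.map (fun q => mot_code q.1)
          = F.items.map (fun q => mot_code q.1) := by
        rw [hFi, List.map_map]
        apply List.map_congr_left
        intro q hq
        by_cases hqp : (q.1 == pw.1) = true
        case pos =>
          have hq1 : q.1 = pw.1 := by simpa using hqp
          simp [Function.comp, hq1]
        case neg => simp [Function.comp, hqp]
      have hmemc : mot_code pw.1 ∈ F.items.map (fun q => mot_code q.1) := by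
        have hpk : pw.1 ∈ F.keys := (PySem.Dict.contains_iff_mem_keys F pw.1).mp hp
        simp only [PySem.Dict.keys, List.mem_map] at hpk
        obtain ⟨q, hqmem, hq1⟩ := hpk
        exact List.mem_map.mpr ⟨q, hqmem, by rw [hq1]⟩
      have hGc : G.contains (mot_code pw.1) = true := hGc_iff.mpr hmemc
      have hgc : (G.getD (mot_code pw.1) PySem.Dict.empty).contains pw.1 = true := by
        rw [hcont]; exact hp
      constructor
      · rw [PySem.Dict.keys_insert_of_contains G _ hGc, ih1]
        unfold codesOf
        rw [hcodes]
      · intro c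
        rw [PySem.Dict.getD_insert]
        by_cases hcc : c = mot_code pw.1
        · subst hcc
          rw [if_pos rfl]
          rw [PySem.Dict.items_insert_of_contains _ _ hgc, hg, hval,
            filter_insert_eq F pw.1 (F.getD pw.1 0 + pw.2) _ rfl hp]
        · rw [if_neg hcc]
          rw [ih2 c, filter_insert_ne F pw.1 (F.getD pw.1 0 + pw.2) c (fun h => hcc h.symm) hp]
    · -- a fresh prefix is appended
      have hp' : F.contains pw.1 = false := by simpa using hp
      have hFi := PySem.Dict.items_insert_of_not_contains F (F.getD pw.1 0 + pw.2) hp'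
      have hgc : (G.getD (mot_code pw.1) PySem.Dict.empty).contains pw.1 = false := by
        rw [hcont]; exact hp'
      have hcodes : (F.insert pw.1 (F.getD pw.1 0 + pw.2)).items.map (fun q => mot_code q.1)
          = F.items.map (fun q => mot_code q.1) ++ [mot_code pw.1] := by
        rw [hFi, List.map_append]; rfl
      constructor
      · unfold codesOf
        rw [hcodes, PySem.Set.ofList_append_singleton]
        by_cases hGc : G.contains (mot_code pw.1) = true
        · rw [PySem.Dict.keys_insert_of_contains G _ hGc, ih1,
            PySem.Set.add_of_mem (by simp only [PySem.Set.mem_ofList]; exact hGc_iff.mp hGc)]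
          simp [codesOf]
        · have hGc' : G.contains (mot_code pw.1) = false := by simpa using hGc
          rw [PySem.Dict.keys_insert_of_not_contains G _ hGc', ih1,
            PySem.Set.add_of_not_mem (by
              simp only [PySem.Set.mem_ofList]
              intro hmem
              exact hGc (hGc_iff.mpr hmem))]
          simp [codesOf]
      · intro c
        rw [PySem.Dict.getD_insert]
        by_cases hcc : c = mot_code pw.1
        · subst hcc
          rw [if_pos rfl]
          rw [PySem.Dict.items_insert_of_not_contains _ _ hgc, hg, hval, hFi,
            List.filter_append]
          simp
        · rw [if_neg hcc]
          rw [ih2 c, hFi, List.filter_append]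
          have : (mot_code pw.1 == c) = false := by
            simpa using (fun h => hcc h.symm)
          simp [this]

lemma fmax_append (l : List (String × Int)) (kv : String × Int) :
    fmax (l ++ [kv]) = fmaxStep (fmax l) kv := by
  simp [fmax, List.foldl_append]

lemma fmax_isSome (l : List (String × Int)) (h : l ≠ []) : (fmax l).isSome := by
  have aux : ∀ (m : List (String × Int)) (b : String × Int),
      (m.foldl fmaxStep (some b)).isSome := by
    intro m
    induction m with
    | nil => intro b; rfl
    | cons a m ih =>
      intro b
      simp only [List.foldl_cons, fmaxStep]
      split <;> exact ih _
  match l with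
  | a :: m => simpa [fmax, fmaxStep] using aux m a

lemma fmax_mem (l : List (String × Int)) (b : String × Int) (h : fmax l = some b) : b ∈ l := by
  have aux : ∀ (m : List (String × Int)) (b0 b : String × Int),
      m.foldl fmaxStep (some b0) = some b → b = b0 ∨ b ∈ m := by
    intro m
    induction m with
    | nil => intro b0 b h; simp at h; exact Or.inl h.symm
    | cons a m ih =>
      intro b0 b h
      simp only [List.foldl_cons, fmaxStep] at h
      split at h
      · rcases ih _ _ h with h' | h'
        · exact Or.inr (by simp [h'])
        · exact Or.inr (List.mem_cons_of_mem _ h')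
      · rcases ih _ _ h with h' | h'
        · exact Or.inl h'
        · exact Or.inr (List.mem_cons_of_mem _ h')
  match l, h with
  | a :: m, h =>
    simp only [fmax, List.foldl_cons, fmaxStep] at h
    rcases aux m a b h with h' | h'
    · simp [h']
    · exact List.mem_cons_of_mem _ h'

-- characterisation of A's second loop as a per-code first-maximum
lemma prop_char (J : List (String × Int)) (F : PySem.Dict String Int)
    (_hF : F.keys.Nodup) (hJF : ∀ pw ∈ J, F.get? pw.1 = some pw.2)
    (hJ : (J.map Prod.fst).Nodup) :
    ((J.map Prod.fst).foldl (propStep F) PySem.Dict.empty).items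
      = (codesOf J).map (fun c => (c, fmaxKey (J.filter (fun pw => mot_code pw.1 == c)))) := by
  induction J using List.reverseRecOn with
  | nil => simp [codesOf, PySem.Set.ofList, PySem.Dict.empty]
  | append_singleton J pw ih =>
    have hJF' : ∀ q ∈ J, F.get? q.1 = some q.2 := fun q hq => hJF q (List.mem_append_left _ hq)
    have hJ' : (J.map Prod.fst).Nodup := by
      rw [List.map_append] at hJ; exact hJ.of_append_left
    have hprop := ih hJF' hJ'
    rw [List.map_append, List.foldl_append]
    simp only [List.map_cons, List.map_nil, List.foldl_cons, List.foldl_nil]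
    set prop := (J.map Prod.fst).foldl (propStep F) PySem.Dict.empty
    have hkeys : prop.keys = codesOf J := by
      simp only [PySem.Dict.keys, hprop, List.map_map]
      conv_rhs => rw [← List.map_id (codesOf J)]
      apply List.map_congr_left
      intro c' _
      rfl
    have hndp : prop.keys.Nodup := by rw [hkeys]; exact PySem.Set.nodup_ofList _
    have hw : F.getD pw.1 0 = pw.2 :=
      PySem.Dict.getD_of_get?_eq_some F 0 (hJF pw (by simp))
    have hcodes' : codesOf (J ++ [pw]) = PySem.Set.add (codesOf J) (mot_code pw.1) := by
      simp only [codesOf, List.map_append, List.map_cons, List.map_nil]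
      exact PySem.Set.ofList_append_singleton _ _
    have hfiltc : (J ++ [pw]).filter (fun q => mot_code q.1 == mot_code pw.1)
        = J.filter (fun q => mot_code q.1 == mot_code pw.1) ++ [pw] := by
      rw [List.filter_append]; simp
    have hfiltne : ∀ c', c' ≠ mot_code pw.1 →
        (J ++ [pw]).filter (fun q => mot_code q.1 == c') = J.filter (fun q => mot_code q.1 == c') := by
      intro c' hne
      rw [List.filter_append]
      have : (mot_code pw.1 == c') = false := by simpa using fun h => hne h.symm
      simp [this]
    by_cases hc : mot_code pw.1 ∈ codesOf J
    · -- the code already has a group: compare with the incumbent maximum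
      have hcontB : prop.contains (mot_code pw.1) = true := by
        rw [PySem.Dict.contains_iff_mem_keys, hkeys]; exact hc
      have hfne : J.filter (fun q => mot_code q.1 == mot_code pw.1) ≠ [] := by
        intro hnil
        rw [codesOf, PySem.Set.mem_ofList, List.mem_map] at hc
        obtain ⟨q, hqJ, hqc⟩ := hc
        have : q ∈ J.filter (fun q => mot_code q.1 == mot_code pw.1) :=
          List.mem_filter.mpr ⟨hqJ, by simpa using hqc⟩
        rw [hnil] at this; exact absurd this (List.not_mem_nil)
      obtain ⟨b0, hb0⟩ := Option.isSome_iff_exists.mp (fmax_isSome _ hfne)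
      have hb0mem := fmax_mem _ _ hb0
      have hb0J : b0 ∈ J := (List.mem_filter.mp hb0mem).1
      have hb0v : F.getD b0.1 0 = b0.2 :=
        PySem.Dict.getD_of_get?_eq_some F 0 (hJF' b0 hb0J)
      have hincitem : (mot_code pw.1, b0.1) ∈ prop.items := by
        rw [hprop]
        refine List.mem_map.mpr ⟨mot_code pw.1, hc, ?_⟩
        simp [fmaxKey, hb0]
      have hinc : prop.getD (mot_code pw.1) "" = b0.1 :=
        PySem.Dict.getD_of_mem_items prop hincitem hndp ""
      unfold propStep
      rw [hcontB, hinc, hb0v, hw]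
      by_cases hlt : b0.2 < pw.2
      · rw [if_pos (by simp [hlt])]
        rw [PySem.Dict.items_insert_of_contains prop pw.1 hcontB, hprop, List.map_map,
          hcodes', PySem.Set.add_of_mem hc]
        apply List.map_congr_left
        intro c' hc'
        by_cases hcc : c' = mot_code pw.1
        · subst hcc
          simp only [Function.comp]
          rw [if_pos (by simp)]
          rw [hfiltc]
          simp only [fmaxKey]
          rw [fmax_append, hb0]
          simp [fmaxStep, hlt]
        · simp only [Function.comp]
          rw [if_neg (by simpa using hcc)]
          rw [hfiltne c' hcc]
      · rw [if_neg (by simp [hlt])]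
        rw [hprop, hcodes', PySem.Set.add_of_mem hc]
        apply List.map_congr_left
        intro c' hc'
        by_cases hcc : c' = mot_code pw.1
        · subst hcc
          rw [hfiltc]
          simp only [fmaxKey]
          rw [fmax_append, hb0]
          simp [fmaxStep, hlt]
        · rw [hfiltne c' hcc]
    · -- first prefix with this code: a new entry is appended
      have hcontB : prop.contains (mot_code pw.1) = false := by
        cases h' : prop.contains (mot_code pw.1) with
        | false => rfl
        | true =>
          rw [PySem.Dict.contains_iff_mem_keys, hkeys] at h'
          exact absurd h' hc
      have hfnil : J.filter (fun q => mot_code q.1 == mot_code pw.1) = [] := by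
        rw [List.filter_eq_nil_iff]
        intro q hqJ hpred
        apply hc
        rw [codesOf, PySem.Set.mem_ofList]
        exact List.mem_map.mpr ⟨q, hqJ, by simpa using hpred⟩
      unfold propStep
      rw [hcontB]
      rw [if_pos (by simp)]
      rw [PySem.Dict.items_insert_of_not_contains prop pw.1 hcontB, hprop,
        hcodes', PySem.Set.add_of_not_mem hc, List.map_append]
      congr 1
      · apply List.map_congr_left
        intro c' hc'
        have hcc : c' ≠ mot_code pw.1 := fun h => hc (h ▸ hc')
        rw [hfiltne c' hcc]
      · simp only [List.map_cons, List.map_nil]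
        rw [hfiltc, hfnil]
        simp [fmaxKey, fmax, fmaxStep]

-- ===== VERDICT (by name: the statement is the Claim_ definition above) =====
theorem predictive_text_spec : Claim_equal_predictive_text := by
  intro dico hdom hpre
  unfold Spec_predictive_text predictive_text predictive_text_alt
  rw [freqOf_eq, groupsOf_eq dico hpre]
  have hnd := nodup_keys_F (updates dico)
  obtain ⟨i1, i2⟩ := part_inv (updates dico)
  have hpropOf : propOf ((updates dico).foldl stepF PySem.Dict.empty)
      = (((updates dico).foldl stepF PySem.Dict.empty).items.map Prod.fst).foldl
          (propStep ((updates dico).foldl stepF PySem.Dict.empty)) PySem.Dict.empty := rfl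
  rw [hpropOf,
    prop_char ((updates dico).foldl stepF PySem.Dict.empty).items
      ((updates dico).foldl stepF PySem.Dict.empty) hnd
      (fun pw hpw => PySem.Dict.get?_of_mem_items _ hpw hnd) hnd]
  have hGnd : ((updates dico).foldl stepG PySem.Dict.empty).keys.Nodup := by
    rw [i1]; unfold codesOf; exact PySem.Set.nodup_ofList _
  rw [PySem.Dict.items_eq_map_keys _ hGnd PySem.Dict.empty, List.map_map, i1]
  apply List.map_congr_left
  intro c hc
  simp only [Function.comp]
  have hmax : maxKeyByVal (((updates dico).foldl stepG PySem.Dict.empty).getD c PySem.Dict.empty)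
      = fmaxKey ((((updates dico).foldl stepG PySem.Dict.empty).getD c PySem.Dict.empty).items) := rfl
  rw [hmax, i2 c]
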